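-- pv_equiv track=rewrite | github.com/pirate-baby/neckbeard | src/cst_frame_depth.py | resolve_total_depths
-- ===== SOURCE A (Python) =====
-- from typing import List, Dict, Set, Optional, Tuple
--
-- def resolve_total_depths(function_depths: Dict[str, int], call_graph: Dict[str, List[str]]) -> Dict[str, int]:
--     """
--     Resolve the total depth for all functions/methods by combining call relationships.
--     """
--     total_depths = {}
--
--     def calculate_depth(func_name: str, visited: Set[str]) -> int:
--         if func_name in total_depths:
--             return total_depths[func_name]
--         if func_name not in function_depths:
--             return 0  # Unknown functions have depth 0
--
--         if func_name in visited:
--             return function_depths[func_name]  # Avoid recursion for cycles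
--
--         visited.add(func_name)
--         base_depth = function_depths[func_name]
--         cumulative_depth = base_depth
--
--         for called_func in call_graph.get(func_name, []):
--             cumulative_depth += calculate_depth(called_func, visited)
--
--         total_depths[func_name] = cumulative_depth
--         visited.remove(func_name)
--         return cumulative_depth
--
--     for func in function_depths.keys():
--         calculate_depth(func, set())
--     return total_depths
-- ===== SOURCE B (Python) =====
-- def resolve_total_depths(function_depths, call_graph):
--     """
--     Resolve the total depth for all functions/methods by combining call
--     relationships.  Iterative version: an explicit stack of frames replaces
--     the recursion; each frame carries (name, accumulated depth, pending calls).
--     """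
--     total_depths = {}
--     for func in function_depths:
--         visited = set()
--         stack = []
--         mode, cur = 'eval', func
--         while True:
--             if mode == 'eval':
--                 f = cur
--                 if f in total_depths:
--                     mode, cur = 'ret', total_depths[f]
--                 elif f not in function_depths:
--                     mode, cur = 'ret', 0
--                 elif f in visited:
--                     mode, cur = 'ret', function_depths[f]
--                 else:
--                     visited.add(f)
--                     stack.append((f, function_depths[f], list(call_graph.get(f, []))))
--                     mode, cur = 'ret', 0
--             else:
--                 if not stack:
--                     break
--                 f, acc, pending = stack.pop()
--                 acc += cur
--                 if pending:
--                     stack.append((f, acc, pending[1:]))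
--                     mode, cur = 'eval', pending[0]
--                 else:
--                     total_depths[f] = acc
--                     visited.remove(f)
--                     mode, cur = 'ret', acc
--     return total_depths
-- ===== Notes on version B (the rewrite author's own statement) =====
-- stated objective: alternative
-- what changed: The nested recursive helper with a cycle-guard set is replaced by an iterative abstract machine: a while loop driving an explicit stack of (name, accumulated depth, pending calls) frames with an eval/return mode, eliminating recursion (and Python's recursion-depth limit) while keeping the same cache and path-set semantics.
import Mathlib
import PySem

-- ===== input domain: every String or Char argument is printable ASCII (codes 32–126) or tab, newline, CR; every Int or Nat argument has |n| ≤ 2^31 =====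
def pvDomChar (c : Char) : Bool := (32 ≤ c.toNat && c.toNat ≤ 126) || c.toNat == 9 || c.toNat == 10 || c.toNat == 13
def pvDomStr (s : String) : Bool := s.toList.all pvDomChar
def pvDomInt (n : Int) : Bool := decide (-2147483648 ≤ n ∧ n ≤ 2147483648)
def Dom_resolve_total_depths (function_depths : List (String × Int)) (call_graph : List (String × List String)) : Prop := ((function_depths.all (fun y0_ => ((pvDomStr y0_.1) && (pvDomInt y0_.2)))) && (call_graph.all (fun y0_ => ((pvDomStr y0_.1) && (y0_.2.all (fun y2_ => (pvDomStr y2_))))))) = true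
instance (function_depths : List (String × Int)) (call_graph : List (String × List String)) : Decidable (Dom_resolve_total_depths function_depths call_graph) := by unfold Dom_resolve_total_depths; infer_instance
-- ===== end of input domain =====

-- B replaces A's recursive helper by an iterative abstract machine (explicit frame stack);
-- same cache/path-set semantics, proved to return the same dict. (alternative decomposition)

-- ===== PORT A =====
-- calculate_depth(func_name, visited), with total_depths threaded through the state.
-- The fuel argument only totalizes the recursion; with fuel = len(function_depths)+1 the
-- 0-fuel branch is unreachable (the visited path holds distinct function_depths keys).
def pvCalcA (fd : PySem.Dict String Int) (cg : PySem.Dict String (List String)) :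
    Nat → String → PySem.Set String → PySem.Dict String Int → Int × PySem.Dict String Int
  | fuel, f, vis, td =>
    match PySem.Dict.get? td f with
    | some v => (v, td)                                   -- if func_name in total_depths
    | none =>
      match PySem.Dict.get? fd f with
      | none => (0, td)                                   -- unknown functions have depth 0
      | some base =>
        if PySem.Set.contains vis f then (base, td)       -- cycle guard
        else
          match fuel with
          | 0 => (0, td)
          | n + 1 =>
            let vis' := PySem.Set.add vis f
            let r := (PySem.Dict.getD cg f []).foldl
                (fun (st : Int × PySem.Dict String Int) c =>
                  let r2 := pvCalcA fd cg n c vis' st.2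
                  (st.1 + r2.1, r2.2))
                (base, td)
            (r.1, PySem.Dict.insert r.2 f r.1)
            -- visited.remove(func_name): vis is passed by value, the caller's set is unchanged

def resolve_total_depths (function_depths : List (String × Int)) (call_graph : List (String × List String)) : List (String × Int) :=
  let fd := PySem.Dict.mk function_depths
  let cg := PySem.Dict.mk call_graph
  (function_depths.foldl
    (fun td p => (pvCalcA fd cg (function_depths.length + 1) p.1 PySem.Set.empty td).2)
    PySem.Dict.empty).items

-- ===== PORT B =====
-- The machine's mode: evaluating a function name, or returning a depth to the top frame.
-- (The Nat in eval is the same totalization fuel as in port A, stored per frame.)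
inductive PvMode : Type
  | eval : String → Nat → PvMode
  | ret  : Int → PvMode
deriving Repr, DecidableEq

-- a frame: (name, accumulated depth, pending called functions, fuel for its children)
abbrev PvFrame : Type := String × Int × List String × Nat

-- termination measure for the machine (proof device only)
def pvW (L : Nat) : Nat → Nat
  | 0 => 1
  | n + 1 => L * (pvW L n + 1) + 2

def pvFrameWeight (L : Nat) (fr : PvFrame) : Nat := fr.2.2.1.length * (pvW L fr.2.2.2 + 1) + 1

def pvModeWeight (L : Nat) : PvMode → Nat
  | .eval _ fuel => pvW L fuel
  | .ret _ => 0

def pvMeasure (L : Nat) (mode : PvMode) (stack : List PvFrame) : Nat :=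
  pvModeWeight L mode + (stack.map (pvFrameWeight L)).sum

def pvMaxPending (cg : PySem.Dict String (List String)) : Nat :=
  (cg.items.map (fun p => p.2.length)).foldr max 0

theorem pvW_pos (L n : Nat) : 0 < pvW L n := by
  cases n <;> simp [pvW]

theorem pvLe_foldr_max : ∀ {xs : List Nat} {x : Nat}, x ∈ xs → x ≤ xs.foldr max 0 := by
  intro xs
  induction xs with
  | nil => intro x h; cases h
  | cons y ys ih =>
    intro x h
    rcases List.mem_cons.mp h with rfl | h'
    · exact Nat.le_max_left _ _
    · exact le_trans (ih h') (Nat.le_max_right _ _)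

theorem pvLen_getD_le (cg : PySem.Dict String (List String)) (f : String) :
    (PySem.Dict.getD cg f []).length ≤ pvMaxPending cg := by
  rw [PySem.Dict.getD_eq_get?_getD]
  cases h : PySem.Dict.get? cg f with
  | none => simp
  | some l =>
    simp only [Option.getD_some]
    have hm : (f, l) ∈ cg.items := PySem.Dict.mem_items_of_get?_eq_some cg h
    exact pvLe_foldr_max (List.mem_map.mpr ⟨(f, l), hm, rfl⟩)

-- the machine: one while-loop iteration per call of pvRun
def pvRun (fd : PySem.Dict String Int) (cg : PySem.Dict String (List String))
    (mode : PvMode) (stack : List PvFrame) (vis : PySem.Set String)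
    (td : PySem.Dict String Int) : PySem.Dict String Int :=
  match mode, stack with
  | .eval f fuel, stack =>
    match PySem.Dict.get? td f with
    | some v => pvRun fd cg (.ret v) stack vis td
    | none =>
      match PySem.Dict.get? fd f with
      | none => pvRun fd cg (.ret 0) stack vis td
      | some base =>
        if PySem.Set.contains vis f then pvRun fd cg (.ret base) stack vis td
        else
          match fuel with
          | 0 => pvRun fd cg (.ret 0) stack vis td
          | n + 1 =>
            pvRun fd cg (.ret 0) ((f, base, PySem.Dict.getD cg f [], n) :: stack)
              (PySem.Set.add vis f) td
  | .ret _, [] => td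
  | .ret v, (f, acc, pending, n) :: rest =>
    match pending with
    | [] => pvRun fd cg (.ret (acc + v)) rest (PySem.Set.discard vis f)
              (PySem.Dict.insert td f (acc + v))
    | c :: cs => pvRun fd cg (.eval c n) ((f, acc + v, cs, n) :: rest) vis td
  termination_by pvMeasure (pvMaxPending cg) mode stack
  decreasing_by
  all_goals
    simp only [pvMeasure, pvModeWeight, pvFrameWeight, List.map_cons, List.sum_cons,
      List.length_cons, List.length_nil, pvW]
  all_goals
    first
    | linarith [pvW_pos (pvMaxPending cg) fuel]
    | omega
    | (have h1 := Nat.mul_le_mul_right (pvW (pvMaxPending cg) n + 1) (pvLen_getD_le cg f)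
       nlinarith)

def resolve_total_depths_alt (function_depths : List (String × Int)) (call_graph : List (String × List String)) : List (String × Int) :=
  let fd := PySem.Dict.mk function_depths
  let cg := PySem.Dict.mk call_graph
  (function_depths.foldl
    (fun td p => pvRun fd cg (.eval p.1 (function_depths.length + 1)) [] PySem.Set.empty td)
    PySem.Dict.empty).items

-- ===== PRECONDITION & SPEC =====
def Spec_resolve_total_depths (function_depths : List (String × Int)) (call_graph : List (String × List String)) (out : List (String × Int)) : Prop := out = resolve_total_depths_alt function_depths call_graph
instance (function_depths : List (String × Int)) (call_graph : List (String × List String)) (out : List (String × Int)) : Decidable (Spec_resolve_total_depths function_depths call_graph out) := by unfold Spec_resolve_total_depths; infer_instance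

-- ===== CLAIM (what is proved, stated in full; the proofs are below) =====
def Claim_equal_resolve_total_depths : Prop := ∀ (function_depths : List (String × Int)) (call_graph : List (String × List String)), Dom_resolve_total_depths function_depths call_graph → Spec_resolve_total_depths function_depths call_graph (resolve_total_depths function_depths call_graph)

-- ===== LEMMAS AND PROOFS =====

theorem pvSet_add_discard (vis : PySem.Set String) (f : String)
    (h : PySem.Set.contains vis f = false) :
    PySem.Set.discard (PySem.Set.add vis f) f = vis := by
  have hm : f ∉ vis := by simpa using h
  simp only [PySem.Set.add, PySem.Set.discard]
  rw [h]
  simp only [Bool.false_eq_true, if_false, List.filter_append]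
  simp only [List.filter_cons, List.filter_nil, beq_self_eq_true, Bool.not_true,
    Bool.false_eq_true, if_false, List.append_nil]
  exact List.filter_eq_self.mpr (fun a ha => by simp; rintro rfl; exact hm ha)

-- frame lemma: running the machine from a return into a frame equals folding pvCalcA
-- over the frame's pending list (given the simulation at fuel n for single evals)
theorem pvRun_frame (fd : PySem.Dict String Int) (cg : PySem.Dict String (List String)) (n : Nat)
    (IH : ∀ f vis td stack, pvRun fd cg (.eval f n) stack vis td =
      pvRun fd cg (.ret (pvCalcA fd cg n f vis td).1) stack vis (pvCalcA fd cg n f vis td).2)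
    (cs : List String) : ∀ (f : String) (acc v : Int) (vis : PySem.Set String)
    (td : PySem.Dict String Int) (stack : List PvFrame),
    pvRun fd cg (.ret v) ((f, acc, cs, n) :: stack) vis td =
      (let r := cs.foldl
        (fun (st : Int × PySem.Dict String Int) c =>
          let r2 := pvCalcA fd cg n c vis st.2
          (st.1 + r2.1, r2.2)) (acc + v, td)
       pvRun fd cg (.ret r.1) stack (PySem.Set.discard vis f) (PySem.Dict.insert r.2 f r.1)) := by
  induction cs with
  | nil =>
    intro f acc v vis td stack
    rw [pvRun]
    simp only [List.foldl_nil]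
  | cons c cs ih =>
    intro f acc v vis td stack
    rw [pvRun]
    rw [IH]
    rw [ih f (acc + v) (pvCalcA fd cg n c vis td).1 vis (pvCalcA fd cg n c vis td).2 stack]
    simp only [List.foldl_cons]

theorem pvRun_eval (fd : PySem.Dict String Int) (cg : PySem.Dict String (List String)) :
    ∀ (n : Nat) (f : String) (vis : PySem.Set String) (td : PySem.Dict String Int)
    (stack : List PvFrame),
    pvRun fd cg (.eval f n) stack vis td =
      pvRun fd cg (.ret (pvCalcA fd cg n f vis td).1) stack vis (pvCalcA fd cg n f vis td).2 := by
  intro n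
  induction n with
  | zero =>
    intro f vis td stack
    rw [pvRun, pvCalcA]
    cases htd : PySem.Dict.get? td f with
    | some v => rfl
    | none =>
      cases hfd : PySem.Dict.get? fd f with
      | none => rfl
      | some base =>
        by_cases hv : f ∈ vis <;> simp [hv]
  | succ m ihm =>
    intro f vis td stack
    rw [pvRun, pvCalcA]
    cases htd : PySem.Dict.get? td f with
    | some v => rfl
    | none =>
      cases hfd : PySem.Dict.get? fd f with
      | none => rfl
      | some base =>
        by_cases hv : f ∈ vis
        · simp [hv]
        · have hc : PySem.Set.contains vis f = false := by simpa using hv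
          simp only [hc, Bool.false_eq_true, if_false]
          rw [pvRun_frame fd cg m ihm (PySem.Dict.getD cg f []) f base 0
            (PySem.Set.add vis f) td stack]
          rw [pvSet_add_discard vis f hc]
          simp

-- ===== VERDICT (by name: the statement is the Claim_ definition above) =====
theorem resolve_total_depths_spec : Claim_equal_resolve_total_depths := by
  intro function_depths call_graph _
  unfold Spec_resolve_total_depths resolve_total_depths resolve_total_depths_alt
  simp only
  congr 1
  apply PySem.List.foldl_congr_mem
  intro td p _
  rw [pvRun_eval, pvRun]
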